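-- pv_equiv track=rewrite | github.com/KyleKulas/nestbox_cam | video_analysis/movement_detection.py | combine_movement_times
-- ===== SOURCE A (Python) =====
-- def combine_movement_times(movement_times, max_time_between_movements=5):
--     """Function to combine movement times that are close together into single
--     movement times"""
--
--     if len(movement_times) == 0:
--         return []
--     elif len(movement_times) == 1:
--         return movement_times.copy()
--
--     cleaned_movement_times = []
--     new_movement = movement_times[0].copy()
--     # look ahead to the next movement, if it happens less than the max time,
--     # combine movements. Otherwise start a new movement
--     for idx in range(len(movement_times)-1):
--         next_movement_start = movement_times[idx + 1][0]
--         if next_movement_start - new_movement[1] < max_time_between_movements: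
--             new_movement[1] = movement_times[idx + 1][1]
--         else:
--             cleaned_movement_times.append(new_movement)
--             new_movement = movement_times[idx + 1].copy()
--
--     # since the for loop does not append the last movement, we need to check if
--     # the last movement time is a new movement of part of the previous movement
--     if movement_times[-1][1] == new_movement[1]:
--         cleaned_movement_times.append(new_movement)
--     else:
--         cleaned_movement_times.append(movement_times[-1].copy())
--
--     return cleaned_movement_times
-- ===== SOURCE B (Python) =====
-- def combine_movement_times(movement_times, max_time_between_movements=5):
--     """Merge close movement intervals, scanning right-to-left and building the
--     result back-to-front: a merge rewrites the head of the result."""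
--     result = []
--     for interval in reversed(movement_times):
--         if result and result[0][0] - interval[1] < max_time_between_movements:
--             merged = interval.copy()
--             merged[1] = result[0][1]
--             result[0] = merged
--         else:
--             result.insert(0, interval.copy())
--     return result
-- ===== Notes on version B (the rewrite author's own statement) =====
-- stated objective: alternative
-- what changed: B scans the intervals right-to-left and builds the result back-to-front: a close gap rewrites the head of the result with a copy of the current interval carrying the merged group's end, replacing A's forward scan with a pending-interval variable, look-ahead indexing and post-loop last-element fixup.
import Mathlib
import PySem

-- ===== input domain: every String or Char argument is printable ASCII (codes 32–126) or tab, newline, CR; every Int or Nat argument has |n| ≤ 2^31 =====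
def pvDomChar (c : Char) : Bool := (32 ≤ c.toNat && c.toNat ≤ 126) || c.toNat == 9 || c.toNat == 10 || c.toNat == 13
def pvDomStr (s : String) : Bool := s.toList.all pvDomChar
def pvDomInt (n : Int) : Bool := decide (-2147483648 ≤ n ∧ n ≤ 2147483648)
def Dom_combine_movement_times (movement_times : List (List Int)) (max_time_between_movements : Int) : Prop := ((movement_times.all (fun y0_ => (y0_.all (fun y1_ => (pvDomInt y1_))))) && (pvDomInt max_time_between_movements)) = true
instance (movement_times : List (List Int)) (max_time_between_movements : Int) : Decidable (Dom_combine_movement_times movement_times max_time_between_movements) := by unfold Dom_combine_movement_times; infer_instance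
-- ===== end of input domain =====

-- B scans the intervals right-to-left, building the result back-to-front (a merge rewrites the
-- head of the result), replacing A's forward look-ahead scan with pending state and final fixup
-- (objective: alternative). Equivalence is about return VALUES (neither mutates its argument,
-- but A's one-element case returns a shallow copy sharing inner lists while B copies them).

-- ===== PORT A =====
-- loop body of A's for-loop: `next` is movement_times[idx+1], st = (cleaned_movement_times, new_movement)
def pvAStep (k : Int) (next : List Int) (st : List (List Int) × List Int) :
    List (List Int) × List Int :=
  if PySem.List.pyGetD next 0 0 - PySem.List.pyGetD st.2 1 0 < k then
    (st.1, PySem.List.pySetD st.2 1 (PySem.List.pyGetD next 1 0))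
  else
    (st.1 ++ [st.2], next)

def combine_movement_times (movement_times : List (List Int)) (max_time_between_movements : Int) : List (List Int) :=
  if movement_times.length = 0 then []
  else if movement_times.length = 1 then movement_times
  else
    let st := (PySem.List.pyRange 0 ((movement_times.length : Int) - 1) 1).foldl
      (fun st idx => pvAStep max_time_between_movements (PySem.List.pyGetD movement_times (idx + 1) []) st)
      ([], PySem.List.pyGetD movement_times 0 [])
    if PySem.List.pyGetD (PySem.List.pyGetD movement_times (-1) []) 1 0 = PySem.List.pyGetD st.2 1 0 then
      st.1 ++ [st.2]
    else
      st.1 ++ [PySem.List.pyGetD movement_times (-1) []]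

-- ===== PORT B =====
-- loop body of B: `result[0] = merged` (head replaced) or `result.insert(0, interval.copy())`
def pvBStep (k : Int) (result : List (List Int)) (interval : List Int) : List (List Int) :=
  if !result.isEmpty &&
      decide (PySem.List.pyGetD (PySem.List.pyGetD result 0 []) 0 0 - PySem.List.pyGetD interval 1 0 < k) then
    PySem.List.pySetD interval 1 (PySem.List.pyGetD (PySem.List.pyGetD result 0 []) 1 0) :: result.tail
  else
    interval :: result

-- `for interval in reversed(movement_times): …`
def combine_movement_times_alt (movement_times : List (List Int)) (max_time_between_movements : Int) : List (List Int) :=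
  movement_times.reverse.foldl (pvBStep max_time_between_movements) []

-- ===== PRECONDITION & SPEC =====
-- Pre_ excludes exactly the inputs on which Python A raises IndexError: with two or more
-- intervals, every interval must have at least two entries (A reads interval[0] and interval[1]).
def Pre_combine_movement_times (movement_times : List (List Int)) (max_time_between_movements : Int) : Prop :=
  movement_times.length ≤ 1 ∨ ∀ l ∈ movement_times, 2 ≤ l.length
instance (movement_times : List (List Int)) (max_time_between_movements : Int) : Decidable (Pre_combine_movement_times movement_times max_time_between_movements) := by unfold Pre_combine_movement_times; infer_instance

def pvWitness_combine_movement_times : List (List Int) × Int := ([[0, 3], [4, 6], [20, 22]], 5)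

def Spec_combine_movement_times (movement_times : List (List Int)) (max_time_between_movements : Int) (out : List (List Int)) : Prop := out = combine_movement_times_alt movement_times max_time_between_movements
instance (movement_times : List (List Int)) (max_time_between_movements : Int) (out : List (List Int)) : Decidable (Spec_combine_movement_times movement_times max_time_between_movements out) := by unfold Spec_combine_movement_times; infer_instance

-- ===== CLAIM (what is proved, stated in full; the proofs are below) =====
def Claim_equal_combine_movement_times : Prop := ∀ (movement_times : List (List Int)) (max_time_between_movements : Int), Dom_combine_movement_times movement_times max_time_between_movements → Pre_combine_movement_times movement_times max_time_between_movements → Spec_combine_movement_times movement_times max_time_between_movements (combine_movement_times movement_times max_time_between_movements)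

-- ===== LEMMAS AND PROOFS =====

-- setting index 1 keeps the length
lemma pv_length_set1 (l : List Int) (v : Int) :
    (PySem.List.pySetD l 1 v).length = l.length := by
  simp [PySem.List.length_pySetD]

-- reading back index 1 after setting it, on a list of length ≥ 2
lemma pv_get1_set1 (l : List Int) (v : Int) (h : 2 ≤ l.length) :
    PySem.List.pyGetD (PySem.List.pySetD l 1 v) 1 0 = v := by
  match l, h with
  | a :: b :: t, _ => simp [PySem.List.pySetD, PySem.List.pySet?, PySem.List.pyGetD,
      PySem.List.pyGet?, PySem.List.pyIdx?]

-- setting index 1 does not change index 0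
lemma pv_set1_eq (a b : Int) (t : List Int) (v : Int) :
    PySem.List.pySetD (a :: b :: t) 1 v = a :: v :: t := by
  simp [PySem.List.pySetD, PySem.List.pySet?, PySem.List.pyIdx?]

lemma pv_get0_set1 (l : List Int) (v : Int) (h : 2 ≤ l.length) :
    PySem.List.pyGetD (PySem.List.pySetD l 1 v) 0 0 = PySem.List.pyGetD l 0 0 := by
  match l, h with
  | a :: b :: t, _ => rw [pv_set1_eq, PySem.List.pyGetD_zero_cons, PySem.List.pyGetD_zero_cons]

-- overwriting index 1 twice
lemma pv_set1_set1 (l : List Int) (v w : Int) (h : 2 ≤ l.length) :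
    PySem.List.pySetD (PySem.List.pySetD l 1 v) 1 w = PySem.List.pySetD l 1 w := by
  match l, h with
  | a :: b :: t, _ => rw [pv_set1_eq, pv_set1_eq, pv_set1_eq]

-- A's index loop over range(len(mt)-1), reading mt[idx+1], is the element fold over the tail
lemma pv_fold_shift (k : Int) (x : List Int) (rest : List (List Int))
    (init : List (List Int) × List Int) :
    (PySem.List.pyRange 0 ((rest.length : Int)) 1).foldl
      (fun st idx => pvAStep k (PySem.List.pyGetD (x :: rest) (idx + 1) []) st) init
    = rest.foldl (fun st next => pvAStep k next st) init := by
  have h : ∀ idx ∈ PySem.List.pyRange 0 ((rest.length : Int)) 1, ∀ st,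
      pvAStep k (PySem.List.pyGetD (x :: rest) (idx + 1) []) st
      = pvAStep k (PySem.List.pyGetD rest idx []) st := by
    intro idx hidx st
    rw [PySem.List.mem_pyRange_one] at hidx
    congr 1
    rw [PySem.List.pyGetD_eq_getElem _ _ (by omega) (by simp; omega),
        PySem.List.pyGetD_eq_getElem _ _ (by omega) (by simpa using hidx.2)]
    have : (idx + 1).toNat = idx.toNat + 1 := by omega
    simp [this]
  calc (PySem.List.pyRange 0 ((rest.length : Int)) 1).foldl
        (fun st idx => pvAStep k (PySem.List.pyGetD (x :: rest) (idx + 1) []) st) init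
      = (PySem.List.pyRange 0 ((rest.length : Int)) 1).foldl
        (fun st idx => pvAStep k (PySem.List.pyGetD rest idx []) st) init := by
        apply PySem.List.foldl_congr_mem
        intro st idx hidx
        exact h idx hidx st
    _ = rest.foldl (fun st next => pvAStep k next st) init :=
        PySem.List.foldl_pyRange_zero_pyGetD' rest [] (fun st next => pvAStep k next st) init

-- A's final new_movement always carries the last interval's end time
lemma pv_snd_fold (k : Int) (rest : List (List Int)) :
    ∀ acc nm, 2 ≤ nm.length → (∀ l ∈ rest, 2 ≤ l.length) → rest ≠ [] →
    PySem.List.pyGetD (rest.foldl (fun st next => pvAStep k next st) (acc, nm)).2 1 0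
      = PySem.List.pyGetD (rest.getLastD []) 1 0 := by
  induction rest with
  | nil => intro _ _ _ _ h; exact absurd rfl h
  | cons next rest ih =>
    intro acc nm hnm hall _
    simp only [List.foldl_cons]
    rcases eq_or_ne rest [] with hr | hr
    · subst hr
      simp only [List.foldl_nil, List.getLastD]
      unfold pvAStep
      split_ifs with hc
      · exact pv_get1_set1 nm _ hnm
      · rfl
    · have hlast : (next :: rest).getLastD ([] : List Int) = rest.getLastD [] := by
        cases rest with
        | nil => exact absurd rfl hr
        | cons a t => simp [List.getLastD]
      rw [hlast]
      unfold pvAStep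
      split_ifs with hc
      · exact ih acc _ (by rw [pv_length_set1]; exact hnm) (fun l hl => hall l (by simp [hl])) hr
      · exact ih (acc ++ [nm]) next (hall next (by simp)) (fun l hl => hall l (by simp [hl])) hr

-- A's accumulator factors out of the fold
lemma pv_acc (k : Int) (t : List (List Int)) :
    ∀ acc nm, t.foldl (fun st next => pvAStep k next st) (acc, nm)
      = (acc ++ (t.foldl (fun st next => pvAStep k next st) ([], nm)).1,
         (t.foldl (fun st next => pvAStep k next st) ([], nm)).2) := by
  induction t with
  | nil => intro acc nm; simp
  | cons y t ih =>
    intro acc nm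
    simp only [List.foldl_cons]
    rw [show pvAStep k y (acc, nm)
        = if PySem.List.pyGetD y 0 0 - PySem.List.pyGetD nm 1 0 < k then
            (acc, PySem.List.pySetD nm 1 (PySem.List.pyGetD y 1 0))
          else (acc ++ [nm], y) from by simp [pvAStep],
        show pvAStep k y (([] : List (List Int)), nm)
        = if PySem.List.pyGetD y 0 0 - PySem.List.pyGetD nm 1 0 < k then
            (([] : List (List Int)), PySem.List.pySetD nm 1 (PySem.List.pyGetD y 1 0))
          else ([nm], y) from by simp [pvAStep]]
    split_ifs with hc
    · exact ih acc _
    · rw [ih (acc ++ [nm]) y, ih [nm] y]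
      simp

-- every interval in B's running result keeps length ≥ 2
lemma pv_b_lens (k : Int) (t : List (List Int)) (hall : ∀ l ∈ t, 2 ≤ l.length) :
    ∀ l ∈ t.foldr (fun x acc => pvBStep k acc x) [], 2 ≤ l.length := by
  induction t with
  | nil => intro l hl; simp at hl
  | cons y t ih =>
    intro l hl
    have ih' := ih (fun l hl => hall l (by simp [hl]))
    have hy : 2 ≤ y.length := hall y (by simp)
    simp only [List.foldr_cons] at hl
    unfold pvBStep at hl
    split_ifs at hl with hc
    · rcases List.mem_cons.mp hl with h | h
      · subst h; rw [pv_length_set1]; exact hy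
      · exact ih' l (List.mem_of_mem_tail h)
    · rcases List.mem_cons.mp hl with h | h
      · subst h; exact hy
      · exact ih' l h

-- B's step always yields a non-empty list whose head keeps the interval's start time
lemma pv_bstep_head (k : Int) (R : List (List Int)) (y : List Int) (hy : 2 ≤ y.length) :
    pvBStep k R y ≠ [] ∧
    PySem.List.pyGetD (PySem.List.pyGetD (pvBStep k R y) 0 []) 0 0 = PySem.List.pyGetD y 0 0 := by
  unfold pvBStep
  split_ifs with hc
  · exact ⟨by simp, by rw [PySem.List.pyGetD_zero_cons]; exact pv_get0_set1 y _ hy⟩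
  · exact ⟨by simp, by rw [PySem.List.pyGetD_zero_cons]⟩

-- core simulation: A's (cleaned, new_movement) fold equals B's back-to-front construction
lemma pv_main (k : Int) (t : List (List Int)) :
    (∀ l ∈ t, 2 ≤ l.length) → ∀ nm, 2 ≤ nm.length →
    (t.foldl (fun st next => pvAStep k next st) ([], nm)).1
      ++ [(t.foldl (fun st next => pvAStep k next st) ([], nm)).2]
    = pvBStep k (t.foldr (fun x acc => pvBStep k acc x) []) nm := by
  induction t with
  | nil => intro _ nm _; simp [pvBStep]
  | cons y t ih =>
    intro hall nm hnm
    have hy : 2 ≤ y.length := hall y (by simp)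
    have hallt : ∀ l ∈ t, 2 ≤ l.length := fun l hl => hall l (by simp [hl])
    simp only [List.foldl_cons, List.foldr_cons]
    rw [show pvAStep k y ([], nm)
        = if PySem.List.pyGetD y 0 0 - PySem.List.pyGetD nm 1 0 < k then
            (([] : List (List Int)), PySem.List.pySetD nm 1 (PySem.List.pyGetD y 1 0))
          else ([nm], y) from by simp [pvAStep]]
    have hRlen : ∀ l ∈ t.foldr (fun x acc => pvBStep k acc x) [], 2 ≤ l.length :=
      pv_b_lens k t hallt
    split_ifs with hc
    · -- merge case
      rw [ih hallt _ (by rw [pv_length_set1]; exact hnm)]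
      generalize hRg : t.foldr (fun x acc => pvBStep k acc x) [] = R at hRlen ⊢
      match R with
      | [] =>
        simp [pvBStep, PySem.List.pyGetD_zero_cons, hc]
      | h :: tR =>
        have hh : 2 ≤ h.length := hRlen h (by simp)
        rw [show pvBStep k (h :: tR) y
            = if PySem.List.pyGetD h 0 0 - PySem.List.pyGetD y 1 0 < k then
                PySem.List.pySetD y 1 (PySem.List.pyGetD h 1 0) :: tR
              else y :: h :: tR from by simp [pvBStep, PySem.List.pyGetD_zero_cons]]
        split_ifs with hc2
        · -- inner merge
          rw [show pvBStep k (PySem.List.pySetD y 1 (PySem.List.pyGetD h 1 0) :: tR) nm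
              = PySem.List.pySetD nm 1 (PySem.List.pyGetD h 1 0) :: tR from by
            simp [pvBStep, PySem.List.pyGetD_zero_cons, pv_get0_set1 y _ hy, hc,
              pv_get1_set1 y _ hy]]
          rw [show pvBStep k (h :: tR) (PySem.List.pySetD nm 1 (PySem.List.pyGetD y 1 0))
              = PySem.List.pySetD (PySem.List.pySetD nm 1 (PySem.List.pyGetD y 1 0)) 1
                  (PySem.List.pyGetD h 1 0) :: tR from by
            simp [pvBStep, PySem.List.pyGetD_zero_cons, pv_get1_set1 nm _ hnm, hc2]]
          rw [pv_set1_set1 nm _ _ hnm]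
        · -- no inner merge
          rw [show pvBStep k (y :: h :: tR) nm
              = PySem.List.pySetD nm 1 (PySem.List.pyGetD y 1 0) :: h :: tR from by
            simp [pvBStep, PySem.List.pyGetD_zero_cons, hc]]
          rw [show pvBStep k (h :: tR) (PySem.List.pySetD nm 1 (PySem.List.pyGetD y 1 0))
              = PySem.List.pySetD nm 1 (PySem.List.pyGetD y 1 0) :: h :: tR from by
            simp [pvBStep, PySem.List.pyGetD_zero_cons, pv_get1_set1 nm _ hnm, hc2]]
    · -- new-group case
      generalize t.foldr (fun x acc => pvBStep k acc x) [] = R at *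
      rw [pv_acc k t [nm] y]
      simp only [List.cons_append, List.nil_append]
      rw [ih hallt y hy]
      obtain ⟨hne, hhead⟩ := pv_bstep_head k R y hy
      rw [show pvBStep k (pvBStep k R y) nm = nm :: pvBStep k R y from by
        match hBy : pvBStep k R y with
        | [] => exact absurd hBy hne
        | z :: zs =>
          have hz : PySem.List.pyGetD z 0 0 = PySem.List.pyGetD y 0 0 := by
            rw [← hhead, hBy, PySem.List.pyGetD_zero_cons]
          simp [pvBStep, PySem.List.pyGetD_zero_cons, hz, hc]]

-- ===== VERDICT (by name: the statement is the Claim_ definition above) =====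
theorem combine_movement_times_spec : Claim_equal_combine_movement_times := by
  intro mt k _ hpre
  unfold Spec_combine_movement_times
  match mt with
  | [] => rfl
  | [x] =>
    show ([x] : List (List Int)) = _
    unfold combine_movement_times_alt
    simp [pvBStep]
  | x :: y :: rest =>
    have hall : ∀ l ∈ x :: y :: rest, 2 ≤ l.length := by
      rcases hpre with h | h
      · simp at h
      · exact h
    have hx : 2 ≤ x.length := hall x (by simp)
    have hlenne : (x :: y :: rest).length ≠ 0 := by simp
    have hlenne1 : (x :: y :: rest).length ≠ 1 := by simp
    unfold combine_movement_times
    rw [if_neg hlenne, if_neg hlenne1]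
    have hlen : ((x :: y :: rest).length : Int) - 1 = ((y :: rest).length : Int) := by
      simp
    have h0 : PySem.List.pyGetD (x :: y :: rest) 0 ([] : List Int) = x := by
      simp [PySem.List.pyGetD_zero]
    rw [hlen, h0, pv_fold_shift]
    have hmlast : PySem.List.pyGetD (x :: y :: rest) (-1) ([] : List Int)
        = (y :: rest).getLastD [] := by
      rw [PySem.List.pyGetD_neg_one (x :: y :: rest) [] (by simp)]
      cases rest with
      | nil => simp
      | cons a t =>
        rw [List.getLast_cons (by simp)]
        exact List.getLast_eq_getLastD (by simp)
    have hsnd := pv_snd_fold k (y :: rest) [] x hx (fun l hl => hall l (by simp [hl])) (by simp)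
    rw [hmlast]
    rw [if_pos (by rw [hsnd])]
    have hB : combine_movement_times_alt (x :: y :: rest) k
        = pvBStep k ((y :: rest).foldr (fun a b => pvBStep k b a) []) x := by
      unfold combine_movement_times_alt
      rw [List.foldl_reverse]
      rfl
    rw [hB]
    exact pv_main k (y :: rest) (fun l hl => hall l (by simp [hl])) x hx
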